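-- pv_equiv track=rewrite | github.com/vaibhavi-r/CSE-415 | Assignment4/playa.py | topRightBottomLeftDiag
-- ===== SOURCE A (Python) =====
-- def getOpposite(current="X"):
--     if current == "X":
--         return "O"
--     else:
--         return "X"
--
-- def topRightBottomLeftDiag(someState, x, y, strict=False, currentSide="X"):
--     lowestRemaining = max(x, y)
--     opposite = getOpposite(currentSide)
--     maxCount = 0
--     current = 0
--     for i in range(lowestRemaining + 1):
--         try:
--             if (someState[x][y] == opposite or someState[x][y] == '-') or (strict == True and someState[x][y] == ' '):
--                 if current > maxCount:
--                     maxCount = current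
--                 current = 0
--             else:
--                  current += 1
--             x -= 1
--             y += 1
--         except IndexError:
--             pass
--     if current > maxCount:
--                 maxCount = current
--     return maxCount
-- ===== SOURCE B (Python) =====
-- def getOpposite(current="X"):
--     if current == "X":
--         return "O"
--     else:
--         return "X"
--
-- def topRightBottomLeftDiag(someState, x, y, strict=False, currentSide="X"):
--     opposite = getOpposite(currentSide)
--     # pass 1: collect the diagonal cells, stopping at the first IndexError
--     vals = []
--     for _ in range(max(x, y) + 1):
--         try:
--             vals.append(someState[x][y])
--         except IndexError:
--             break
--         x -= 1
--         y += 1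
--     # pass 2: longest run of non-blocking cells
--     best = run = 0
--     for v in vals:
--         run = 0 if (v == opposite or v == '-' or (strict and v == ' ')) else run + 1
--         best = max(best, run)
--     return best
-- ===== Notes on version B (the rewrite author's own statement) =====
-- stated objective: faster
-- what changed: Replaces A's single fused loop (try/except with frozen x,y state and end-of-loop flush of the running count) by two passes: collect the anti-diagonal cells, breaking at the first IndexError instead of catching it on every remaining iteration, then a longest-run scan over that list.
import Mathlib
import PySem

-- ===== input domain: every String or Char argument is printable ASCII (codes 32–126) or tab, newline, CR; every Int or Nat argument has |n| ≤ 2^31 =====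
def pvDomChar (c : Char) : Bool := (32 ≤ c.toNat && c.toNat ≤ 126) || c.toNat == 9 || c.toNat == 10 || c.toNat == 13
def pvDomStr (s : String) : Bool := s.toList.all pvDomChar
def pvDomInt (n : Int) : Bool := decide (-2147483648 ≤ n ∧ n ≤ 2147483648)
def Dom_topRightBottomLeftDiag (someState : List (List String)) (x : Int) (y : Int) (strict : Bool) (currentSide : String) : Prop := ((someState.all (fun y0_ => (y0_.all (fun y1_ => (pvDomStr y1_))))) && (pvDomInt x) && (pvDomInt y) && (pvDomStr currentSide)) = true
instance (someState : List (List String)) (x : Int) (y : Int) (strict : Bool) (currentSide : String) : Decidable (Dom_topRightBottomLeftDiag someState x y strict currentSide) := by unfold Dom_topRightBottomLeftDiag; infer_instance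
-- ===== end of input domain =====

-- B re-decomposes A's fused try/except counting loop into two passes (collect the
-- diagonal cells until the first IndexError, then a longest-run scan); return value only.

-- ===== PORT A =====
def getOppositeL (current : String) : String :=
  if current == "X" then "O" else "X"

-- someState[x][y] with Python semantics; none = IndexError (caught by A's except)
def pvReadCell (someState : List (List String)) (x y : Int) : Option String :=
  (PySem.List.pyGet? someState x).bind (fun row => PySem.List.pyGet? row y)

-- A's for-loop: on IndexError nothing changes (x,y stay frozen, so it keeps raising)
def pvLoopA (s : List (List String)) (opp : String) (strict : Bool) :
    Nat → Int → Int → Int → Int → Int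
  | 0, _, _, mx, cur => if cur > mx then cur else mx
  | Nat.succ n, x, y, mx, cur =>
    match pvReadCell s x y with
    | none => pvLoopA s opp strict n x y mx cur
    | some v =>
      if (v == opp || v == "-") || (strict == true && v == " ") then
        pvLoopA s opp strict n (x - 1) (y + 1) (if cur > mx then cur else mx) 0
      else
        pvLoopA s opp strict n (x - 1) (y + 1) mx (cur + 1)

def topRightBottomLeftDiag (someState : List (List String)) (x : Int) (y : Int) (strict : Bool) (currentSide : String) : Int :=
  let lowestRemaining := max x y
  let opposite := getOppositeL currentSide
  pvLoopA someState opposite strict (lowestRemaining + 1).toNat x y 0 0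

-- ===== PORT B =====
-- pass 1 of Source B: collect the diagonal values, break at the first IndexError
def pvCollect (s : List (List String)) : Nat → Int → Int → List String
  | 0, _, _ => []
  | Nat.succ n, x, y =>
    match pvReadCell s x y with
    | none => []
    | some v => v :: pvCollect s n (x - 1) (y + 1)

def pvBlocked (opp : String) (strict : Bool) (v : String) : Bool :=
  v == opp || v == "-" || (strict && v == " ")

-- pass 2 of Source B: one step of the longest-run scan, state = (best, run)
def pvRunStep (opp : String) (strict : Bool) (st : Int × Int) (v : String) : Int × Int :=
  let run := if pvBlocked opp strict v then 0 else st.2 + 1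
  (max st.1 run, run)

def topRightBottomLeftDiag_alt (someState : List (List String)) (x : Int) (y : Int) (strict : Bool) (currentSide : String) : Int :=
  let opposite := getOppositeL currentSide
  let vals := pvCollect someState (max x y + 1).toNat x y
  (vals.foldl (pvRunStep opposite strict) (0, 0)).1

-- ===== PRECONDITION & SPEC =====
def Spec_topRightBottomLeftDiag (someState : List (List String)) (x : Int) (y : Int) (strict : Bool) (currentSide : String) (out : Int) : Prop := out = topRightBottomLeftDiag_alt someState x y strict currentSide
instance (someState : List (List String)) (x : Int) (y : Int) (strict : Bool) (currentSide : String) (out : Int) : Decidable (Spec_topRightBottomLeftDiag someState x y strict currentSide out) := by unfold Spec_topRightBottomLeftDiag; infer_instance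

-- ===== CLAIM (what is proved, stated in full; the proofs are below) =====
def Claim_equal_topRightBottomLeftDiag : Prop := ∀ (someState : List (List String)) (x : Int) (y : Int) (strict : Bool) (currentSide : String), Dom_topRightBottomLeftDiag someState x y strict currentSide → Spec_topRightBottomLeftDiag someState x y strict currentSide (topRightBottomLeftDiag someState x y strict currentSide)

-- ===== LEMMAS AND PROOFS =====

-- A's two blocking predicates coincide
lemma blocked_eq (opp : String) (strict : Bool) (v : String) :
    ((v == opp || v == "-") || (strict == true && v == " ")) = pvBlocked opp strict v := by
  cases strict <;> simp [pvBlocked]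

-- once the read fails, A's loop is stuck and just flushes the current run
lemma pvLoopA_stuck (s : List (List String)) (opp : String) (strict : Bool)
    (n : Nat) (x y mx cur : Int) (h : pvReadCell s x y = none) :
    pvLoopA s opp strict n x y mx cur = if cur > mx then cur else mx := by
  induction n with
  | zero => rfl
  | succ n ih => simp [pvLoopA, h, ih]

-- loop invariant: A's (mx, cur) and B's (best, run) track each other
lemma pvLoopA_eq_fold (s : List (List String)) (opp : String) (strict : Bool) :
    ∀ (n : Nat) (x y mx cur : Int), 0 ≤ mx → 0 ≤ cur →
    pvLoopA s opp strict n x y mx cur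
      = ((pvCollect s n x y).foldl (pvRunStep opp strict) (max mx cur, cur)).1 := by
  intro n
  induction n with
  | zero =>
    intro x y mx cur _ _
    simp [pvLoopA, pvCollect]
    omega
  | succ n ih =>
    intro x y mx cur hmx hcur
    cases hr : pvReadCell s x y with
    | none =>
      simp [pvLoopA, pvCollect, hr, pvLoopA_stuck s opp strict n x y mx cur hr]
      omega
    | some v =>
      simp only [pvLoopA, pvCollect, hr, List.foldl_cons, blocked_eq]
      by_cases hb : pvBlocked opp strict v = true
      · rw [if_pos hb, ih (x-1) (y+1) (if cur > mx then cur else mx) 0 (by split <;> omega) le_rfl]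
        have e : pvRunStep opp strict (max mx cur, cur) v
            = (max (if cur > mx then cur else mx) (0:Int), 0) := by
          simp only [pvRunStep, hb, if_true, Prod.mk.injEq]
          refine ⟨?_, trivial⟩
          split <;> omega
        rw [e]
      · have hb' : pvBlocked opp strict v = false := by simpa using hb
        have h1 : max (max mx cur) (cur + 1) = max mx (cur + 1) := by omega
        simp [hb', pvRunStep, ih (x-1) (y+1) mx (cur+1) hmx (by omega), h1]

-- ===== VERDICT (by name: the statement is the Claim_ definition above) =====
theorem topRightBottomLeftDiag_spec : Claim_equal_topRightBottomLeftDiag := by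
  intro someState x y strict currentSide _
  show _ = _
  unfold topRightBottomLeftDiag topRightBottomLeftDiag_alt
  simpa using pvLoopA_eq_fold someState (getOppositeL currentSide) strict
    (max x y + 1).toNat x y 0 0 le_rfl le_rfl
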